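-- pv_equiv track=rewrite | github.com/TonkoshkuraMisha/python2024 | integer_points_circle_improve_3D.py | count_integer_points_within_sphere
-- ===== SOURCE A (Python) =====
-- def count_integer_points_within_sphere(radius):
--     count = 0
--     radius_squared = radius ** 2
--     points = []
--
--     # Проходим по всем точкам (x, y, z), которые могут попадать внутрь сферы радиуса radius
--     for x in range(-radius, radius + 1):
--         for y in range(-radius, radius + 1):
--             for z in range(-radius, radius + 1):
--                 if x ** 2 + y ** 2 + z ** 2 <= radius_squared:
--                     points.append((x, y, z))
--                     count += 1
--
--     return count, points
-- ===== SOURCE B (Python) =====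
-- def count_integer_points_within_sphere(radius):
--     points = []
--     radius_squared = radius * radius
--     for x in range(-radius, radius + 1):
--         x_squared = x * x
--         for y in range(-radius, radius + 1):
--             remaining = radius_squared - x_squared - y * y
--             if remaining >= 0:
--                 # largest z with z*z <= remaining (integer sqrt by upward scan)
--                 z = 0
--                 while (z + 1) * (z + 1) <= remaining:
--                     z += 1
--                 points.extend((x, y, t) for t in range(-z, z + 1))
--     return len(points), points
-- ===== Notes on version B (the rewrite author's own statement) =====
-- stated objective: alternative
-- what changed: The innermost scan over all z in range(-radius, radius+1) with a per-z membership test is replaced by computing the exact integer bound zmax (largest z with z*z <= remaining budget) and extending the list with the whole run range(-zmax, zmax+1) at once, so no per-point sphere test is performed and count is len(points).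
import Mathlib
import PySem

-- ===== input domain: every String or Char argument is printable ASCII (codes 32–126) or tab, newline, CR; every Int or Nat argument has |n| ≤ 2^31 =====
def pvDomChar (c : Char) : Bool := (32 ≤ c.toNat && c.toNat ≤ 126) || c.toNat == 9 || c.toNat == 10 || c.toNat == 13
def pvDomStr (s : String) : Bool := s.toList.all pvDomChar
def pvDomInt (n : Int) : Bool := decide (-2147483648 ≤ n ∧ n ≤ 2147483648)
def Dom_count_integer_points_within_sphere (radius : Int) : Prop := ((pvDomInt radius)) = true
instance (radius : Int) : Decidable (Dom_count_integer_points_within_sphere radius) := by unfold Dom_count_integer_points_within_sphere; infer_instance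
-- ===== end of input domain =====

-- B replaces A's innermost per-z membership test by the closed run range(-zmax, zmax+1)
-- (zmax the integer sqrt of the remaining budget), extended in one go: identical output
-- without the per-point sphere test.

-- ===== PORT A =====
def count_integer_points_within_sphere (radius : Int) : Int × (List (Int × Int × Int)) :=
  let radius_squared := radius ^ 2
  (PySem.List.pyRange (-radius) (radius + 1) 1).foldl (fun acc x =>
    (PySem.List.pyRange (-radius) (radius + 1) 1).foldl (fun acc y =>
      (PySem.List.pyRange (-radius) (radius + 1) 1).foldl (fun acc z =>
        if x ^ 2 + y ^ 2 + z ^ 2 ≤ radius_squared then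
          (acc.1 + 1, acc.2 ++ [(x, y, z)])
        else acc) acc) acc) ((0 : Int), ([] : List (Int × Int × Int)))

-- ===== PORT B =====
-- 'while (z+1)*(z+1) <= remaining: z += 1' of Source B
def pvZmax (rem z : Int) : Int :=
  if h : (z + 1) * (z + 1) ≤ rem then pvZmax rem (z + 1) else z
termination_by (rem - z).toNat
decreasing_by
  have hz : z + 1 ≤ rem := by
    by_cases h0 : z + 1 ≤ 0
    · nlinarith [mul_self_nonneg (z + 1)]
    · nlinarith
  omega

def count_integer_points_within_sphere_alt (radius : Int) : Int × (List (Int × Int × Int)) :=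
  let radius_squared := radius * radius
  let points := (PySem.List.pyRange (-radius) (radius + 1) 1).foldl (fun ps x =>
    let x_squared := x * x
    (PySem.List.pyRange (-radius) (radius + 1) 1).foldl (fun ps y =>
      let remaining := radius_squared - x_squared - y * y
      if 0 ≤ remaining then
        ps ++ (PySem.List.pyRange (-(pvZmax remaining 0)) (pvZmax remaining 0 + 1) 1).map
          (fun t => (x, y, t))
      else ps) ps) ([] : List (Int × Int × Int))
  ((points.length : Int), points)

-- ===== PRECONDITION & SPEC =====
def Spec_count_integer_points_within_sphere (radius : Int) (out : Int × (List (Int × Int × Int))) : Prop := out = count_integer_points_within_sphere_alt radius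
instance (radius : Int) (out : Int × (List (Int × Int × Int))) : Decidable (Spec_count_integer_points_within_sphere radius out) := by unfold Spec_count_integer_points_within_sphere; infer_instance

-- ===== CLAIM (what is proved, stated in full; the proofs are below) =====
def Claim_equal_count_integer_points_within_sphere : Prop := ∀ (radius : Int), Dom_count_integer_points_within_sphere radius → Spec_count_integer_points_within_sphere radius (count_integer_points_within_sphere radius)

-- ===== LEMMAS AND PROOFS =====

-- the per-(x,y) run of points both programs produce
def pvCell (radius x y : Int) : List (Int × Int × Int) :=
  let rem := radius * radius - x * x - y * y
  if 0 ≤ rem then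
    (PySem.List.pyRange (-(pvZmax rem 0)) (pvZmax rem 0 + 1) 1).map (fun t => (x, y, t))
  else []

theorem pvZmax_spec : ∀ (n : ℕ) (rem z : Int), (rem - z).toNat = n → 0 ≤ z → z * z ≤ rem →
    z ≤ pvZmax rem z ∧ (pvZmax rem z) * (pvZmax rem z) ≤ rem ∧
      rem < (pvZmax rem z + 1) * (pvZmax rem z + 1) := by
  intro n
  induction n using Nat.strong_induction_on with
  | _ n ih =>
    intro rem z hn hz hle
    rw [pvZmax]
    split_ifs with h
    · have hz1 : z + 1 ≤ rem := by nlinarith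
      have := ih ((rem - (z + 1)).toNat) (by omega) rem (z + 1) rfl (by omega) h
      exact ⟨by omega, this.2.1, this.2.2⟩
    · exact ⟨le_refl _, hle, by omega⟩

theorem filter_pyRange_interval (m : Int) (p : Int → Bool)
    (hp : ∀ z, p z = true ↔ (-m ≤ z ∧ z ≤ m)) :
    ∀ (n : ℕ) (a b : Int), (b - a).toNat = n →
      (PySem.List.pyRange a b 1).filter p =
        PySem.List.pyRange (max a (-m)) (min b (m + 1)) 1 := by
  intro n
  induction n using Nat.strong_induction_on with
  | _ n ih =>
    intro a b hn
    by_cases hba : b ≤ a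
    · rw [PySem.List.pyRange_one_eq_nil hba, PySem.List.pyRange_one_eq_nil (by omega)]
      rfl
    · have hab : a < b := by omega
      rw [PySem.List.pyRange_one_cons hab]
      have hrest := ih ((b - (a + 1)).toNat) (by omega) (a + 1) b rfl
      by_cases hpa : p a = true
      · have hin := (hp a).mp hpa
        rw [List.filter_cons_of_pos hpa, hrest]
        have h1 : max (a + 1) (-m) = a + 1 := by omega
        have h2 : max a (-m) = a := by omega
        rw [h1, h2, PySem.List.pyRange_one_cons (show a < min b (m + 1) by omega)]
      · have hout : ¬(-m ≤ a ∧ a ≤ m) := fun hc => hpa ((hp a).mpr hc)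
        rw [List.filter_cons_of_neg (by simpa using hpa), hrest]
        rcases (by omega : a < -m ∨ m < a) with hlt | hgt
        · have h1 : max (a + 1) (-m) = -m := by omega
          have h2 : max a (-m) = -m := by omega
          rw [h1, h2]
        · have h1 : min b (m + 1) ≤ max (a + 1) (-m) := by omega
          have h2 : min b (m + 1) ≤ max a (-m) := by omega
          rw [PySem.List.pyRange_one_eq_nil h1, PySem.List.pyRange_one_eq_nil h2]

-- A's inner z-loop in closed form
theorem innerA_eq (x y rs : Int) :
    ∀ (l : List Int) (acc : Int × List (Int × Int × Int)),
      l.foldl (fun acc z =>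
        if x ^ 2 + y ^ 2 + z ^ 2 ≤ rs then (acc.1 + 1, acc.2 ++ [(x, y, z)]) else acc) acc =
      (acc.1 + ((l.filter (fun z => decide (x ^ 2 + y ^ 2 + z ^ 2 ≤ rs))).length : Int),
        acc.2 ++ (l.filter (fun z => decide (x ^ 2 + y ^ 2 + z ^ 2 ≤ rs))).map (fun z => (x, y, z))) := by
  intro l
  induction l with
  | nil => intro acc; simp
  | cons h t ih =>
    intro acc
    by_cases hc : x ^ 2 + y ^ 2 + h ^ 2 ≤ rs
    · have hf : (h :: t).filter (fun z => decide (x ^ 2 + y ^ 2 + z ^ 2 ≤ rs)) =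
          h :: t.filter (fun z => decide (x ^ 2 + y ^ 2 + z ^ 2 ≤ rs)) := by
        simp [hc]
      rw [List.foldl_cons, if_pos hc, ih, hf]
      simp only [List.length_cons, List.map_cons, Prod.mk.injEq]
      constructor
      · push_cast; ring
      · simp
    · have hf : (h :: t).filter (fun z => decide (x ^ 2 + y ^ 2 + z ^ 2 ≤ rs)) =
          t.filter (fun z => decide (x ^ 2 + y ^ 2 + z ^ 2 ≤ rs)) := by
        simp [hc]
      rw [List.foldl_cons, if_neg hc, hf]
      exact ih acc

-- a fold that appends a run and adds its length, in closed form
theorem pairfold_eq (F : Int → List (Int × Int × Int)) :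
    ∀ (l : List Int) (acc : Int × List (Int × Int × Int)),
      l.foldl (fun acc a => (acc.1 + ((F a).length : Int), acc.2 ++ F a)) acc =
      (acc.1 + ((l.flatMap F).length : Int), acc.2 ++ l.flatMap F) := by
  intro l
  induction l with
  | nil => intro acc; simp
  | cons h t ih =>
    intro acc
    rw [List.foldl_cons, ih]
    simp only [List.flatMap_cons, List.length_append, Prod.mk.injEq]
    constructor
    · push_cast; ring
    · simp

-- the filtered z-range equals the closed run pvCell (for x,y inside the loop ranges)
theorem cell_eq (radius x y : Int) (hx : -radius ≤ x ∧ x < radius + 1)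
    (_hy : -radius ≤ y ∧ y < radius + 1) :
    ((PySem.List.pyRange (-radius) (radius + 1) 1).filter
        (fun z => decide (x ^ 2 + y ^ 2 + z ^ 2 ≤ radius ^ 2))).map (fun z => (x, y, z)) =
      pvCell radius x y := by
  have hr : 0 ≤ radius := by omega
  set rem := radius * radius - x * x - y * y with hrem
  have hcond : ∀ z : Int, (x ^ 2 + y ^ 2 + z ^ 2 ≤ radius ^ 2) ↔ z * z ≤ rem := by
    intro z; constructor <;> intro h <;> nlinarith [sq_nonneg z]
  unfold pvCell
  rw [← hrem]
  by_cases h0 : 0 ≤ rem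
  · rw [if_pos h0]
    obtain ⟨-, hm1, hm2⟩ := pvZmax_spec ((rem - 0).toNat) rem 0 rfl le_rfl (by simpa using h0)
    set m := pvZmax rem 0 with hm
    have hm0 : 0 ≤ m := by nlinarith
    have hiff : ∀ z : Int, (decide (x ^ 2 + y ^ 2 + z ^ 2 ≤ radius ^ 2)) = true ↔ (-m ≤ z ∧ z ≤ m) := by
      intro z
      rw [decide_eq_true_iff, hcond]
      constructor
      · intro h
        constructor
        · by_contra hc; push_neg at hc; nlinarith
        · by_contra hc; push_neg at hc; nlinarith
      · intro ⟨h1, h2⟩; nlinarith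
    rw [filter_pyRange_interval m _ hiff ((radius + 1 - (-radius)).toNat) (-radius) (radius + 1) rfl]
    have hmr : m ≤ radius := by nlinarith
    have e1 : max (-radius) (-m) = -m := by omega
    have e2 : min (radius + 1) (m + 1) = m + 1 := by omega
    rw [e1, e2]
  · rw [if_neg h0]
    have : (PySem.List.pyRange (-radius) (radius + 1) 1).filter
        (fun z => decide (x ^ 2 + y ^ 2 + z ^ 2 ≤ radius ^ 2)) = [] := by
      apply List.filter_eq_nil_iff.mpr
      intro z _
      simp only [decide_eq_true_iff, hcond]
      intro hc
      nlinarith [mul_self_nonneg z]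
    rw [this]
    rfl

theorem count_eq_alt (radius : Int) :
    count_integer_points_within_sphere radius = count_integer_points_within_sphere_alt radius := by
  simp only [count_integer_points_within_sphere, count_integer_points_within_sphere_alt]
  set xs := PySem.List.pyRange (-radius) (radius + 1) 1 with hxs
  have hmem : ∀ v : Int, v ∈ xs → -radius ≤ v ∧ v < radius + 1 := by
    intro v hv
    rw [hxs, PySem.List.mem_pyRange_one] at hv
    exact hv
  have hA : xs.foldl (fun acc x => xs.foldl (fun acc y =>
        xs.foldl (fun acc z =>
          if x ^ 2 + y ^ 2 + z ^ 2 ≤ radius ^ 2 then (acc.1 + 1, acc.2 ++ [(x, y, z)]) else acc)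
          acc) acc) ((0 : Int), ([] : List (Int × Int × Int))) =
      (((xs.flatMap (fun x => xs.flatMap (pvCell radius x))).length : Int),
        xs.flatMap (fun x => xs.flatMap (pvCell radius x))) := by
    have step : ∀ (acc : Int × List (Int × Int × Int)), ∀ x ∈ xs,
        xs.foldl (fun acc y => xs.foldl (fun acc z =>
            if x ^ 2 + y ^ 2 + z ^ 2 ≤ radius ^ 2 then (acc.1 + 1, acc.2 ++ [(x, y, z)]) else acc)
          acc) acc =
        (acc.1 + (((xs.flatMap (pvCell radius x))).length : Int), acc.2 ++ xs.flatMap (pvCell radius x)) := by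
      intro acc x hxmem
      have inner : ∀ (acc : Int × List (Int × Int × Int)), ∀ y ∈ xs,
          xs.foldl (fun acc z =>
            if x ^ 2 + y ^ 2 + z ^ 2 ≤ radius ^ 2 then (acc.1 + 1, acc.2 ++ [(x, y, z)]) else acc)
            acc = (acc.1 + ((pvCell radius x y).length : Int), acc.2 ++ pvCell radius x y) := by
        intro acc y hymem
        rw [innerA_eq x y (radius ^ 2) xs acc, ← cell_eq radius x y (hmem x hxmem) (hmem y hymem),
          ← hxs]
        simp
      rw [PySem.List.foldl_congr_mem xs _
        (fun acc y => (acc.1 + ((pvCell radius x y).length : Int), acc.2 ++ pvCell radius x y))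
        acc inner, pairfold_eq (pvCell radius x) xs acc]
    rw [PySem.List.foldl_congr_mem xs _
      (fun acc x => (acc.1 + ((xs.flatMap (pvCell radius x)).length : Int),
        acc.2 ++ xs.flatMap (pvCell radius x)))
      ((0 : Int), ([] : List (Int × Int × Int))) step,
      pairfold_eq (fun x => xs.flatMap (pvCell radius x)) xs
        ((0 : Int), ([] : List (Int × Int × Int)))]
    simp
  have hB : xs.foldl (fun ps x => xs.foldl (fun ps y =>
        if 0 ≤ radius * radius - x * x - y * y then
          ps ++ (PySem.List.pyRange (-(pvZmax (radius * radius - x * x - y * y) 0))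
            (pvZmax (radius * radius - x * x - y * y) 0 + 1) 1).map (fun t => (x, y, t))
        else ps) ps) ([] : List (Int × Int × Int)) =
      xs.flatMap (fun x => xs.flatMap (pvCell radius x)) := by
    have stepB : ∀ (ps : List (Int × Int × Int)), ∀ x ∈ xs,
        xs.foldl (fun ps y =>
          if 0 ≤ radius * radius - x * x - y * y then
            ps ++ (PySem.List.pyRange (-(pvZmax (radius * radius - x * x - y * y) 0))
              (pvZmax (radius * radius - x * x - y * y) 0 + 1) 1).map (fun t => (x, y, t))
          else ps) ps = ps ++ xs.flatMap (pvCell radius x) := by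
      intro ps x _
      have innerB : ∀ (ps : List (Int × Int × Int)), ∀ y ∈ xs,
          (if 0 ≤ radius * radius - x * x - y * y then
            ps ++ (PySem.List.pyRange (-(pvZmax (radius * radius - x * x - y * y) 0))
              (pvZmax (radius * radius - x * x - y * y) 0 + 1) 1).map (fun t => (x, y, t))
          else ps) = ps ++ pvCell radius x y := by
        intro ps y _
        simp only [pvCell]
        by_cases hcond : 0 ≤ radius * radius - x * x - y * y
        · rw [if_pos hcond, if_pos hcond]
        · rw [if_neg hcond, if_neg hcond]
          simp
      rw [PySem.List.foldl_congr_mem xs _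
        (fun ps y => ps ++ pvCell radius x y) ps innerB,
        PySem.List.foldl_append_eq_flatMap]
    rw [PySem.List.foldl_congr_mem xs _
      (fun ps x => ps ++ xs.flatMap (pvCell radius x))
      ([] : List (Int × Int × Int)) stepB,
      PySem.List.foldl_append_eq_flatMap]
    simp
  rw [hA, hB]

-- ===== VERDICT (by name: the statement is the Claim_ definition above) =====
theorem count_integer_points_within_sphere_spec : Claim_equal_count_integer_points_within_sphere := by
  intro radius _
  unfold Spec_count_integer_points_within_sphere
  exact count_eq_alt radius
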